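-- pv_equiv track=rewrite | github.com/aditya616727/coding_ninja_solution | Create Sequence/solution2_optimal.py | createSequence
-- ===== SOURCE A (Python) =====
-- from collections import deque
--
-- def createSequence(n):
--     # Write your code here.
--
--     result = []
--     q = deque(["2", "5"])
--
--     while q:
--         num_str = q.popleft()
--         num = int(num_str)
--
--         if num <= n:   # only consider numbers less than n
--             result.append(num)
--             q.append(num_str + "2")
--             q.append(num_str + "5")
--
--     return sorted(result)
-- ===== SOURCE B (Python) =====
-- def createSequence(n):
--     # A 2/5-digit number of L digits corresponds to an L-bit index: bit i
--     # chooses the digit at place 10**i (0 -> 2, 1 -> 5).  Enumerating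
--     # (length, index) in increasing order produces the numbers already in
--     # increasing order, so no queue and no final sort are needed.
--     digits = 0
--     p = 1
--     while p <= n:          # p = 10**digits; stop when 10**digits > n
--         p *= 10
--         digits += 1
--     result = []
--     for length in range(1, digits + 1):
--         for mask in range(2 ** length):
--             v, pw, m = 0, 1, mask
--             for _ in range(length):
--                 v += (5 if m % 2 else 2) * pw
--                 pw *= 10
--                 m //= 2
--             if v <= n:
--                 result.append(v)
--     return result
-- ===== Notes on version B (the rewrite author's own statement) =====
-- stated objective: alternative
-- what changed: Replaces A's deque BFS over digit strings plus final sort with a direct indexed enumeration: compute the digit-count bound from n, then for each length L and each L-bit index build the corresponding 2/5 number arithmetically (bit i -> digit at place 10^i) and keep it if <= n; the (length, index) order is already the numeric order, so the sort disappears.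
import Mathlib
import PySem

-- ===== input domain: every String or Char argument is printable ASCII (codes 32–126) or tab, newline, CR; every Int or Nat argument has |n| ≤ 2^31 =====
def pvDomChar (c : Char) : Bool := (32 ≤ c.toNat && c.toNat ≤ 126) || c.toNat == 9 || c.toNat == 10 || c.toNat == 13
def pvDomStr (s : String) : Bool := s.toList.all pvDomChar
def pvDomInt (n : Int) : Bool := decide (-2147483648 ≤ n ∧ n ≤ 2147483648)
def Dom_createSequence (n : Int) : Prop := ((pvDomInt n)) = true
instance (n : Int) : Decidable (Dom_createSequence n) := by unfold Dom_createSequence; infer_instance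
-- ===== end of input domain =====

-- B replaces A's deque BFS over digit strings (plus final sort) by a direct
-- indexed enumeration: each 2/5-number of L digits is rebuilt arithmetically
-- from an L-bit index, in an order that is already sorted (objective: alternative).

-- ===== PORT A =====
-- A's while-loop over the deque; Python strings are ported on the List Char side
-- (PySem convention).  The fuel is only a totality guard for the while loop: it is
-- never exhausted on the stated domain (proved below).
def aLoop (n : Int) : Nat → List (List Char) → List Int → List Int
  | 0, _, result => result
  | _ + 1, [], result => result
  | fuel + 1, s :: q, result =>
      -- num = int(num_str); the parse always succeeds: s is a nonempty digit string
      let num := (PySem.Int.ofChars? s).getD 0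
      if num ≤ n then
        aLoop n fuel (q ++ [s ++ ['2'], s ++ ['5']]) (result ++ [num])
      else
        aLoop n fuel q result

def createSequence (n : Int) : List Int :=
  PySem.List.sorted (aLoop n 100000 [['2'], ['5']] []) (fun x => x) false

-- ===== PORT B =====
-- Source B's digit-count while loop ('while p <= n: p *= 10; digits += 1'); the fuel
-- is only a totality guard (never exhausted on the stated domain, proved below).
def bDigitsLoop (n : Int) : Nat → Int → Int → Int
  | 0, _, d => d
  | fuel + 1, p, d => if p ≤ n then bDigitsLoop n fuel (p * 10) (d + 1) else d

-- Source B's inner 'for _ in range(length)' loop over state (v, pw, m); the Nat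
-- recursion depth is length.toNat — exact, since range(length) has max(length,0)
-- iterations; the digit choice is Python's truthiness test m % 2 ≠ 0.
def bNumLoop : Nat → Int → Int → Int → Int
  | 0, v, _, _ => v
  | k + 1, v, pw, m =>
      bNumLoop k (v + (if PySem.Int.mod m 2 ≠ 0 then 5 else 2) * pw) (pw * 10)
        (PySem.Int.floordiv m 2)

-- '2 ** length' is ported as (2 : Int) ^ length.toNat (length ≥ 0 on the range)
def createSequence_alt (n : Int) : List Int :=
  let digits := bDigitsLoop n 64 1 0
  (PySem.List.pyRange 1 (digits + 1) 1).foldl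
    (fun res length =>
      (PySem.List.pyRange 0 ((2 : Int) ^ length.toNat) 1).foldl
        (fun res mask =>
          let v := bNumLoop length.toNat 0 1 mask
          if v ≤ n then res ++ [v] else res)
        res)
    []

-- ===== PRECONDITION & SPEC =====
def Spec_createSequence (n : Int) (out : List Int) : Prop := out = createSequence_alt n
instance (n : Int) (out : List Int) : Decidable (Spec_createSequence n out) := by unfold Spec_createSequence; infer_instance

-- ===== CLAIM (what is proved, stated in full; the proofs are below) =====
def Claim_equal_createSequence : Prop := ∀ (n : Int), Dom_createSequence n → Spec_createSequence n (createSequence n)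

-- ===== LEMMAS AND PROOFS =====

-- ---- proof-side vocabulary ----

-- the integer value of a digit string (what int() returns on it)
def valC (s : List Char) : Int := s.foldl (fun a c => 10 * a + ((c.toNat : Int) - 48)) 0

-- the 2/5-strings of digit length ℓ+1, in increasing order
def expandC (ss : List (List Char)) : List (List Char) :=
  ss.flatMap (fun s => [s ++ ['2'], s ++ ['5']])
def lvlC : Nat → List (List Char)
  | 0 => [['2'], ['5']]
  | ℓ + 1 => expandC (lvlC ℓ)

-- smallest value at level ℓ (the number 22…2 with ℓ+1 digits)
def lo : Nat → Int
  | 0 => 2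
  | ℓ + 1 => 10 * lo ℓ + 2

-- A's loop with the queue abstracted to the parsed values
def vloop (n : Int) : Nat → List Int → List Int → List Int
  | 0, _, result => result
  | _ + 1, [], result => result
  | fuel + 1, v :: q, result =>
      if v ≤ n then vloop n fuel (q ++ [10 * v + 2, 10 * v + 5]) (result ++ [v])
      else vloop n fuel q result

-- the values A emits from seed v, to depth d
def tree (n : Int) : Nat → Int → List Int
  | 0, _ => []
  | d + 1, v => if v ≤ n then v :: (tree n d (10 * v + 2) ++ tree n d (10 * v + 5)) else []

-- number of queue pops seed v causes, to depth d
def cost (n : Int) : Nat → Int → Nat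
  | 0, _ => 1
  | d + 1, v => if v ≤ n then 1 + cost n d (10 * v + 2) + cost n d (10 * v + 5) else 1

-- all descendants of v (v included), to depth d
def desc : Nat → Int → List Int
  | 0, _ => []
  | d + 1, v => v :: (desc d (10 * v + 2) ++ desc d (10 * v + 5))

-- the candidate universe by levels: f levels starting from cur
def expandI (vs : List Int) : List Int := vs.flatMap (fun v => [10 * v + 2, 10 * v + 5])
def descAll : Nat → List Int → List Int
  | 0, _ => []
  | f + 1, cur => cur ++ descAll f (expandI cur)
def expandIter : Nat → List Int → List Int
  | 0, vs => vs
  | a + 1, vs => expandIter a (expandI vs)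

-- invariant at level ℓ of the candidate universe
def BInv (ℓ : Nat) (cur : List Int) : Prop :=
  cur ≠ [] ∧ cur.Pairwise (· < ·) ∧ ∀ v ∈ cur, 2 * 10 ^ ℓ ≤ v ∧ v < 10 ^ (ℓ + 1)

-- B's reference value: the 2/5-number of L digits indexed by the L-bit mask m
def num25 : Nat → Nat → Int
  | 0, _ => 0
  | L + 1, m => 10 * num25 L (m / 2) + (if m % 2 = 1 then 5 else 2)

-- the 2/5-numbers of L digits in mask order
def lvlI (L : Nat) : List Int := (List.range (2 ^ L)).map (num25 L)

-- ---- string-side facts ----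

theorem valC_append (s : List Char) (c : Char) :
    valC (s ++ [c]) = 10 * valC s + ((c.toNat : Int) - 48) := by
  simp [valC, List.foldl_append]

set_option maxRecDepth 40000 in
theorem parse_table :
    ((List.range 10).all fun ℓ => (lvlC ℓ).all fun s =>
      PySem.Int.ofChars? s == some (valC s)) = true := by decide

theorem parse_ok {ℓ : Nat} {s : List Char} (hℓ : ℓ ≤ 9) (hs : s ∈ lvlC ℓ) :
    PySem.Int.ofChars? s = some (valC s) := by
  have h := parse_table
  simp only [List.all_eq_true, List.mem_range, beq_iff_eq] at h
  exact h ℓ (by omega) s hs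

theorem mem_lvl_append {ℓ : Nat} {s : List Char} (hs : s ∈ lvlC ℓ) :
    s ++ ['2'] ∈ lvlC (ℓ + 1) ∧ s ++ ['5'] ∈ lvlC (ℓ + 1) := by
  constructor <;> (simp only [lvlC, expandC, List.mem_flatMap]; exact ⟨s, hs, by simp⟩)

theorem lo_le_valC : ∀ (ℓ : Nat) (s : List Char), s ∈ lvlC ℓ → lo ℓ ≤ valC s := by
  intro ℓ
  induction ℓ with
  | zero =>
    intro s hs
    simp only [lvlC, List.mem_cons, List.not_mem_nil, or_false] at hs
    rcases hs with rfl | rfl <;> decide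
  | succ ℓ ih =>
    intro s hs
    simp only [lvlC, expandC, List.mem_flatMap, List.mem_cons,
      List.not_mem_nil, or_false] at hs
    have h2 : ('2'.toNat : Int) = 50 := by decide
    have h5 : ('5'.toNat : Int) = 53 := by decide
    obtain ⟨t, ht, rfl | rfl⟩ := hs <;>
      (rw [valC_append]; have := ih t ht; simp only [lo]; omega)

theorem lo_nine : lo 9 = 2222222222 := by decide

-- ---- A's loop: strings to values ----

theorem aLoop_eq_vloop (n : Int) (hn : n ≤ 2147483648) :
    ∀ (fuel : Nat) (ps : List (List Char × Int)) (res : List Int),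
      (∀ p ∈ ps, ∃ ℓ, ℓ ≤ 9 ∧ p.1 ∈ lvlC ℓ ∧ p.2 = valC p.1) →
      aLoop n fuel (ps.map Prod.fst) res = vloop n fuel (ps.map Prod.snd) res := by
  intro fuel
  induction fuel with
  | zero => intro ps res _; rfl
  | succ fuel ih =>
    intro ps res hps
    match ps with
    | [] => rfl
    | ⟨s, v⟩ :: ps' =>
      obtain ⟨ℓ, hℓ, hs, hv⟩ := hps ⟨s, v⟩ (List.mem_cons_self ..)
      simp only at hs hv
      have hparse : (PySem.Int.ofChars? s).getD 0 = v := by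
        rw [parse_ok hℓ hs, hv]; rfl
      simp only [List.map_cons, aLoop, vloop, hparse]
      have h2 : ('2'.toNat : Int) = 50 := by decide
      have h5 : ('5'.toNat : Int) = 53 := by decide
      by_cases hvn : v ≤ n
      · rw [if_pos hvn, if_pos hvn]
        have hℓ8 : ℓ ≤ 8 := by
          by_contra hgt
          have hℓ9 : ℓ = 9 := by omega
          have := lo_le_valC ℓ s hs
          rw [hℓ9, lo_nine] at this
          omega
        have := ih (ps' ++ [(s ++ ['2'], 10 * v + 2), (s ++ ['5'], 10 * v + 5)])
          (res ++ [v]) ?_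
        · simpa using this
        · intro p hp
          rcases List.mem_append.mp hp with hp | hp
          · exact hps p (List.mem_cons_of_mem _ hp)
          · have hm := mem_lvl_append hs
            simp only [List.mem_cons, List.not_mem_nil, or_false] at hp
            rcases hp with rfl | rfl
            · exact ⟨ℓ + 1, by omega, hm.1, by rw [valC_append, ← hv]; omega⟩
            · exact ⟨ℓ + 1, by omega, hm.2, by rw [valC_append, ← hv]; omega⟩
      · rw [if_neg hvn, if_neg hvn]
        exact ih ps' res (fun p hp => hps p (List.mem_cons_of_mem _ hp))

-- ---- depth stabilisation and fuel bounds ----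

theorem cost_pos (n : Int) (d : Nat) (v : Int) : 1 ≤ cost n d v := by
  cases d <;> simp only [cost] <;> first | omega | (split <;> omega)

theorem cost_le (n : Int) : ∀ (d : Nat) (v : Int), cost n d v ≤ 2 ^ (d + 1) - 1 := by
  intro d
  induction d with
  | zero => intro v; simp [cost]
  | succ d ih =>
    intro v
    have h2 := ih (10 * v + 2)
    have h5 := ih (10 * v + 5)
    have hp : 1 ≤ 2 ^ (d + 1) := Nat.one_le_two_pow
    simp only [cost, pow_succ]
    split <;> omega

theorem tree_stab (n : Int) : ∀ (d : Nat) (v : Int), 2 ≤ v → n < v * 10 ^ d →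
    tree n (d + 1) v = tree n d v := by
  intro d
  induction d with
  | zero =>
    intro v hv hn
    simp only [pow_zero, mul_one] at hn
    simp [tree, not_le.mpr hn]
  | succ d ih =>
    intro v hv hn
    have hp : (0 : Int) < 10 ^ d := by positivity
    have h2 : n < (10 * v + 2) * 10 ^ d := by nlinarith [pow_succ (10 : Int) d]
    have h5 : n < (10 * v + 5) * 10 ^ d := by nlinarith [pow_succ (10 : Int) d]
    show (if v ≤ n then v :: (tree n (d + 1) (10 * v + 2) ++ tree n (d + 1) (10 * v + 5)) else [])
      = (if v ≤ n then v :: (tree n d (10 * v + 2) ++ tree n d (10 * v + 5)) else [])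
    split
    · rw [ih (10 * v + 2) (by omega) h2, ih (10 * v + 5) (by omega) h5]
    · rfl

theorem cost_stab (n : Int) : ∀ (d : Nat) (v : Int), 2 ≤ v → n < v * 10 ^ d →
    cost n (d + 1) v = cost n d v := by
  intro d
  induction d with
  | zero =>
    intro v hv hn
    simp only [pow_zero, mul_one] at hn
    simp [cost, not_le.mpr hn]
  | succ d ih =>
    intro v hv hn
    have hp : (0 : Int) < 10 ^ d := by positivity
    have h2 : n < (10 * v + 2) * 10 ^ d := by nlinarith [pow_succ (10 : Int) d]
    have h5 : n < (10 * v + 5) * 10 ^ d := by nlinarith [pow_succ (10 : Int) d]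
    show (if v ≤ n then 1 + cost n (d + 1) (10 * v + 2) + cost n (d + 1) (10 * v + 5) else 1)
      = (if v ≤ n then 1 + cost n d (10 * v + 2) + cost n d (10 * v + 5) else 1)
    split
    · rw [ih (10 * v + 2) (by omega) h2, ih (10 * v + 5) (by omega) h5]
    · rfl

-- ---- A's value loop is a permutation of the forest of emitted values ----

theorem vloop_perm (n : Int) (hn : n < 2000000000000) :
    ∀ (fuel : Nat) (q res : List Int), (∀ v ∈ q, 2 ≤ v) →
      (q.map (cost n 12)).sum ≤ fuel →
      (vloop n fuel q res).Perm (res ++ q.flatMap (tree n 12)) := by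
  intro fuel
  induction fuel with
  | zero =>
    intro q res hq hf
    match q with
    | [] => simp [vloop]
    | v :: q' =>
      exfalso
      have := cost_pos n 12 v
      simp only [List.map_cons, List.sum_cons] at hf
      omega
  | succ fuel ih =>
    intro q res hq hf
    match q with
    | [] => simp [vloop]
    | v :: q' =>
      have hv : 2 ≤ v := hq v (List.mem_cons_self ..)
      have hq' : ∀ u ∈ q', 2 ≤ u := fun u hu => hq u (List.mem_cons_of_mem _ hu)
      simp only [List.map_cons, List.sum_cons] at hf
      by_cases hvn : v ≤ n
      · -- the node is accepted and expanded
        have hc2 : n < (10 * v + 2) * 10 ^ 11 := by nlinarith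
        have hc5 : n < (10 * v + 5) * 10 ^ 11 := by nlinarith
        have hcost : cost n 12 v = 1 + cost n 12 (10 * v + 2) + cost n 12 (10 * v + 5) := by
          rw [show cost n 12 v = if v ≤ n then 1 + cost n 11 (10 * v + 2) + cost n 11 (10 * v + 5)
              else 1 from rfl, if_pos hvn,
            ← cost_stab n 11 (10 * v + 2) (by omega) hc2,
            ← cost_stab n 11 (10 * v + 5) (by omega) hc5]
        have htree : tree n 12 v = v :: (tree n 12 (10 * v + 2) ++ tree n 12 (10 * v + 5)) := by
          rw [show tree n 12 v = if v ≤ n then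
              v :: (tree n 11 (10 * v + 2) ++ tree n 11 (10 * v + 5)) else [] from rfl,
            if_pos hvn,
            ← tree_stab n 11 (10 * v + 2) (by omega) hc2,
            ← tree_stab n 11 (10 * v + 5) (by omega) hc5]
        rw [show vloop n (fuel + 1) (v :: q') res
            = vloop n fuel (q' ++ [10 * v + 2, 10 * v + 5]) (res ++ [v]) from by
          simp [vloop, hvn]]
        have hmem : ∀ u ∈ q' ++ [10 * v + 2, 10 * v + 5], 2 ≤ u := by
          intro u hu
          rcases List.mem_append.mp hu with hu | hu
          · exact hq' u hu
          · simp only [List.mem_cons, List.not_mem_nil, or_false] at hu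
            rcases hu with rfl | rfl <;> omega
        have hsum : ((q' ++ [10 * v + 2, 10 * v + 5]).map (cost n 12)).sum ≤ fuel := by
          simp only [List.map_append, List.sum_append, List.map_cons, List.sum_cons,
            List.map_nil, List.sum_nil]
          omega
        refine (ih (q' ++ [10 * v + 2, 10 * v + 5]) (res ++ [v]) hmem hsum).trans ?_
        simp only [List.flatMap_append, List.flatMap_cons, htree, List.flatMap_nil,
          List.append_nil, List.append_assoc]
        refine List.Perm.append_left res ?_
        have hcomm := List.Perm.append_left [v]
          (List.perm_append_comm (l₁ := q'.flatMap (tree n 12))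
            (l₂ := tree n 12 (10 * v + 2) ++ tree n 12 (10 * v + 5)))
        simpa [List.append_assoc] using hcomm
      · -- the node is discarded
        have htree : tree n 12 v = [] := by
          rw [show tree n 12 v = if v ≤ n then
              v :: (tree n 11 (10 * v + 2) ++ tree n 11 (10 * v + 5)) else [] from rfl,
            if_neg hvn]
        rw [show vloop n (fuel + 1) (v :: q') res = vloop n fuel q' res from by simp [vloop, hvn]]
        have hcp := cost_pos n 12 v
        have hih := ih q' res hq' (by omega)
        simpa [htree] using hih

-- ---- trees vs. filtered descendant lists ----

theorem desc_ge : ∀ (d : Nat) (v w : Int), 0 ≤ v → w ∈ desc d v → v ≤ w := by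
  intro d
  induction d with
  | zero => intro v w _ hw; simp [desc] at hw
  | succ d ih =>
    intro v w hv hw
    simp only [desc, List.mem_cons, List.mem_append] at hw
    rcases hw with rfl | hw | hw
    · exact le_refl w
    · exact le_trans (by omega) (ih (10 * v + 2) w (by omega) hw)
    · exact le_trans (by omega) (ih (10 * v + 5) w (by omega) hw)

theorem tree_eq_filter_desc (n : Int) : ∀ (d : Nat) (v : Int), 2 ≤ v →
    tree n d v = (desc d v).filter (fun w => decide (w ≤ n)) := by
  intro d
  induction d with
  | zero => intro v _; rfl
  | succ d ih =>
    intro v hv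
    by_cases hvn : v ≤ n
    · rw [show tree n (d + 1) v = v :: (tree n d (10 * v + 2) ++ tree n d (10 * v + 5)) from
        by simp [tree, hvn]]
      rw [ih (10 * v + 2) (by omega), ih (10 * v + 5) (by omega)]
      show _ = List.filter _ (v :: (desc d (10 * v + 2) ++ desc d (10 * v + 5)))
      simp [List.filter_append, hvn]
    · simp only [tree, if_neg hvn]
      symm
      rw [List.filter_eq_nil_iff]
      intro w hw
      have := desc_ge (d + 1) v w (by omega) hw
      simp only [decide_eq_true_eq]
      omega

-- ---- the level universe: order and bounds ----

theorem pairwise_expandI : ∀ (cur : List Int), cur.Pairwise (· < ·) →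
    (expandI cur).Pairwise (· < ·) := by
  intro cur
  induction cur with
  | nil => intro _; simp [expandI]
  | cons a t ih =>
    intro h
    rw [List.pairwise_cons] at h
    rw [show expandI (a :: t) = [10 * a + 2, 10 * a + 5] ++ expandI t from rfl,
      List.pairwise_append]
    refine ⟨List.pairwise_pair.mpr (by omega), ih h.2, ?_⟩
    intro x hx y hy
    simp only [List.mem_cons, List.not_mem_nil, or_false] at hx
    simp only [expandI, List.mem_flatMap, List.mem_cons, List.not_mem_nil, or_false] at hy
    obtain ⟨b, hb, hy⟩ := hy
    have hab := h.1 b hb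
    rcases hx with rfl | rfl <;> rcases hy with rfl | rfl <;> omega

theorem BInv_expand {ℓ : Nat} {cur : List Int} (h : BInv ℓ cur) : BInv (ℓ + 1) (expandI cur) := by
  obtain ⟨hne, hpw, hb⟩ := h
  refine ⟨?_, pairwise_expandI cur hpw, ?_⟩
  · obtain ⟨a, t, rfl⟩ := List.exists_cons_of_ne_nil hne
    simp [expandI]
  · intro v hv
    simp only [expandI, List.mem_flatMap, List.mem_cons, List.not_mem_nil, or_false] at hv
    have hs1 : (10 : Int) ^ (ℓ + 1) = 10 ^ ℓ * 10 := pow_succ 10 ℓ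
    have hs2 : (10 : Int) ^ (ℓ + 1 + 1) = 10 ^ (ℓ + 1) * 10 := pow_succ 10 (ℓ + 1)
    obtain ⟨u, hu, rfl | rfl⟩ := hv <;> (obtain ⟨h1, h2⟩ := hb u hu; omega)

theorem descAll_exists_le : ∀ (f : Nat) (vs : List Int) (w : Int), (∀ u ∈ vs, 0 ≤ u) →
    w ∈ descAll f vs → ∃ u ∈ vs, u ≤ w := by
  intro f
  induction f with
  | zero => intro vs w _ hw; simp [descAll] at hw
  | succ f ih =>
    intro vs w hvs hw
    rcases List.mem_append.mp hw with hw | hw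
    · exact ⟨w, hw, le_refl w⟩
    · have hnn : ∀ u ∈ expandI vs, 0 ≤ u := by
        intro u hu
        simp only [expandI, List.mem_flatMap, List.mem_cons, List.not_mem_nil, or_false] at hu
        obtain ⟨x, hx, rfl | rfl⟩ := hu <;> (have := hvs x hx; omega)
      obtain ⟨u, hu, huw⟩ := ih (expandI vs) w hnn hw
      simp only [expandI, List.mem_flatMap, List.mem_cons, List.not_mem_nil, or_false] at hu
      obtain ⟨x, hx, rfl | rfl⟩ := hu <;> (have := hvs x hx; exact ⟨x, hx, by omega⟩)

theorem descAll_pairwise : ∀ (f ℓ : Nat) (cur : List Int), BInv ℓ cur →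
    (descAll f cur).Pairwise (· < ·) := by
  intro f
  induction f with
  | zero => intro ℓ cur _; simp [descAll]
  | succ f ih =>
    intro ℓ cur hinv
    have hinv' := BInv_expand hinv
    rw [show descAll (f + 1) cur = cur ++ descAll f (expandI cur) from rfl,
      List.pairwise_append]
    refine ⟨hinv.2.1, ih (ℓ + 1) _ hinv', ?_⟩
    intro x hx y hy
    have hxb := (hinv.2.2 x hx).2
    have hnn : ∀ u ∈ expandI cur, 0 ≤ u := by
      intro u hu
      have h1 := (hinv'.2.2 u hu).1
      have hp : (0 : Int) < 10 ^ (ℓ + 1) := by positivity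
      omega
    obtain ⟨u, hu, huy⟩ := descAll_exists_le f (expandI cur) y hnn hy
    have hub := (hinv'.2.2 u hu).1
    have hp : (0 : Int) < 10 ^ (ℓ + 1) := by positivity
    rw [pow_succ] at *
    omega

-- ---- aligning the two candidate universes ----

theorem interleave (g : Int → List Int) :
    ∀ (vs : List Int), (vs ++ vs.flatMap g).Perm (vs.flatMap (fun v => v :: g v)) := by
  intro vs
  induction vs with
  | nil => simp
  | cons a t ih =>
    simp only [List.flatMap_cons, List.cons_append]
    refine List.Perm.cons a ?_
    have h1 : (t ++ (g a ++ t.flatMap g)).Perm (g a ++ (t ++ t.flatMap g)) := by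
      have := (List.perm_append_comm (l₁ := t) (l₂ := g a)).append_right (t.flatMap g)
      simpa [List.append_assoc] using this
    exact h1.trans (List.Perm.append_left (g a) ih)

theorem descAll_perm_flatMap_desc : ∀ (d : Nat) (vs : List Int),
    (descAll d vs).Perm (vs.flatMap (desc d)) := by
  intro d
  induction d with
  | zero =>
    intro vs
    simp [descAll, desc, List.flatMap_eq_nil_iff]
  | succ d ih =>
    intro vs
    rw [show descAll (d + 1) vs = vs ++ descAll d (expandI vs) from rfl]
    refine ((List.Perm.append_left vs (ih (expandI vs))).trans ?_)
    have hflat : (expandI vs).flatMap (desc d)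
        = vs.flatMap (fun v => desc d (10 * v + 2) ++ desc d (10 * v + 5)) := by
      simp [expandI, List.flatMap_assoc]
    rw [hflat,
      show vs.flatMap (desc (d + 1))
        = vs.flatMap (fun v => v :: (desc d (10 * v + 2) ++ desc d (10 * v + 5))) from rfl]
    exact interleave _ vs

theorem descAll_split : ∀ (a b : Nat) (vs : List Int),
    descAll (a + b) vs = descAll a vs ++ descAll b (expandIter a vs) := by
  intro a
  induction a with
  | zero => intro b vs; simp [descAll, expandIter]
  | succ a ih =>
    intro b vs
    rw [show a + 1 + b = (a + b) + 1 from by omega,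
      show descAll ((a + b) + 1) vs = vs ++ descAll (a + b) (expandI vs) from rfl,
      ih b (expandI vs),
      show descAll (a + 1) vs = vs ++ descAll a (expandI vs) from rfl,
      show expandIter (a + 1) vs = expandIter a (expandI vs) from rfl,
      List.append_assoc]

theorem expandIter_ge_gen : ∀ (a : Nat) (vs : List Int) (m v : Int), 0 ≤ m →
    (∀ u ∈ vs, m ≤ u) → v ∈ expandIter a vs → m * 10 ^ a ≤ v := by
  intro a
  induction a with
  | zero => intro vs m v _ hvs hv; simpa using hvs v hv
  | succ a ih =>
    intro vs m v hm hvs hv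
    have step : ∀ u ∈ expandI vs, 10 * m ≤ u := by
      intro u hu
      simp only [expandI, List.mem_flatMap, List.mem_cons, List.not_mem_nil, or_false] at hu
      obtain ⟨x, hx, rfl | rfl⟩ := hu <;> (have := hvs x hx; omega)
    have := ih (expandI vs) (10 * m) v (by omega) step hv
    calc m * 10 ^ (a + 1) = 10 * m * 10 ^ a := by ring
    _ ≤ v := this

theorem expandIter_ge (a : Nat) (vs : List Int) (v : Int) (h : ∀ u ∈ vs, 2 ≤ u)
    (hv : v ∈ expandIter a vs) : 2 * 10 ^ a ≤ v :=
  expandIter_ge_gen a vs 2 v (by omega) h hv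

-- ---- B's mask enumeration produces the level universe ----

theorem bNumLoop_eq : ∀ (L : Nat) (v pw : Int) (m : Nat),
    bNumLoop L v pw (m : Int) = v + pw * num25 L m := by
  intro L
  induction L with
  | zero => intro v pw m; simp [bNumLoop, num25]
  | succ L ih =>
    intro v pw m
    have hm : PySem.Int.mod (m : Int) 2 = ((m % 2 : Nat) : Int) := PySem.Int.mod_natCast m 2
    have hd : PySem.Int.floordiv (m : Int) 2 = ((m / 2 : Nat) : Int) :=
      PySem.Int.floordiv_natCast m 2
    rw [show bNumLoop (L + 1) v pw (m : Int)
        = bNumLoop L (v + (if PySem.Int.mod (m : Int) 2 ≠ 0 then 5 else 2) * pw) (pw * 10)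
            (PySem.Int.floordiv (m : Int) 2) from rfl,
      hm, hd, ih]
    rcases Nat.mod_two_eq_zero_or_one m with h | h <;>
      · rw [show num25 (L + 1) m
            = 10 * num25 L (m / 2) + (if m % 2 = 1 then 5 else 2) from rfl, h]
        norm_num
        ring

theorem range_double : ∀ (k : Nat),
    List.range (2 * k) = (List.range k).flatMap (fun p => [2 * p, 2 * p + 1]) := by
  intro k
  induction k with
  | zero => rfl
  | succ k ih =>
    rw [show 2 * (k + 1) = (2 * k + 1) + 1 from by ring, List.range_succ, List.range_succ,
      List.range_succ, List.flatMap_append, ih]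
    simp

theorem num25_double (L p : Nat) :
    num25 (L + 1) (2 * p) = 10 * num25 L p + 2 ∧
    num25 (L + 1) (2 * p + 1) = 10 * num25 L p + 5 := by
  have h1 : (2 * p) / 2 = p := by omega
  have h2 : (2 * p) % 2 = 0 := by omega
  have h3 : (2 * p + 1) / 2 = p := by omega
  have h4 : (2 * p + 1) % 2 = 1 := by omega
  constructor <;> simp [num25, h1, h2, h3, h4]

theorem lvlI_succ (L : Nat) : lvlI (L + 1) = expandI (lvlI L) := by
  unfold lvlI expandI
  rw [show (2 : Nat) ^ (L + 1) = 2 * 2 ^ L from by rw [pow_succ]; ring,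
    range_double, List.map_flatMap, List.flatMap_map]
  refine List.flatMap_congr (fun p _ => ?_)
  simp [(num25_double L p).1, (num25_double L p).2]

theorem expandIter_expandI : ∀ (a : Nat) (vs : List Int),
    expandIter a (expandI vs) = expandI (expandIter a vs) := by
  intro a
  induction a with
  | zero => intro vs; rfl
  | succ a ih =>
    intro vs
    rw [show expandIter (a + 1) (expandI vs) = expandIter a (expandI (expandI vs)) from rfl,
      ih (expandI vs),
      show expandIter (a + 1) vs = expandIter a (expandI vs) from rfl]

theorem lvlI_eq_expandIter : ∀ (L : Nat), lvlI (L + 1) = expandIter L [2, 5] := by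
  intro L
  induction L with
  | zero => decide
  | succ L ih =>
    rw [lvlI_succ, ih,
      show expandIter (L + 1) [2, 5] = expandIter L (expandI [2, 5]) from rfl,
      expandIter_expandI]

theorem descAll_succ_right : ∀ (f : Nat) (vs : List Int),
    descAll (f + 1) vs = descAll f vs ++ expandIter f vs := by
  intro f
  induction f with
  | zero => intro vs; simp [descAll, expandIter]
  | succ f ih =>
    intro vs
    rw [show descAll (f + 1 + 1) vs = vs ++ descAll (f + 1) (expandI vs) from rfl,
      ih (expandI vs),
      show descAll (f + 1) vs = vs ++ descAll f (expandI vs) from rfl,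
      show expandIter (f + 1) vs = expandIter f (expandI vs) from rfl,
      List.append_assoc]

theorem flat_lvlI_eq_descAll : ∀ (R : Nat),
    (List.range R).flatMap (fun k => lvlI (k + 1)) = descAll R [2, 5] := by
  intro R
  induction R with
  | zero => rfl
  | succ R ih =>
    rw [List.range_succ, List.flatMap_append, ih]
    simp only [List.flatMap_cons, List.flatMap_nil, List.append_nil]
    rw [lvlI_eq_expandIter, descAll_succ_right]

-- ---- B's digit-count loop ----

theorem bDigits_spec (n : Int) : ∀ (fuel d : Nat), n < 10 ^ (d + fuel) →
    ∃ R : Nat, bDigitsLoop n fuel ((10 : Int) ^ d) (d : Int) = (R : Int) ∧ d ≤ R ∧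
      n < (10 : Int) ^ R ∧ (R = d ∨ (10 : Int) ^ (R - 1) ≤ n) := by
  intro fuel
  induction fuel with
  | zero =>
    intro d h
    exact ⟨d, rfl, le_refl d, by simpa using h, Or.inl rfl⟩
  | succ fuel ih =>
    intro d h
    rw [show bDigitsLoop n (fuel + 1) ((10 : Int) ^ d) (d : Int)
        = if (10 : Int) ^ d ≤ n then bDigitsLoop n fuel ((10 : Int) ^ d * 10) ((d : Int) + 1)
          else (d : Int) from rfl]
    by_cases hc : (10 : Int) ^ d ≤ n
    · rw [if_pos hc]
      obtain ⟨R, hR, hdR, hnR, halt⟩ := ih (d + 1) (by rw [show d + 1 + fuel = d + (fuel + 1) from by omega]; exact h)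
      refine ⟨R, ?_, by omega, hnR, ?_⟩
      · rw [← hR, show ((d + 1 : Nat) : Int) = (d : Int) + 1 from by push_cast; ring,
          pow_succ]
      · rcases halt with rfl | halt
        · right; simpa using hc
        · right; exact halt
    · rw [if_neg hc]
      exact ⟨d, rfl, le_refl d, by omega, Or.inl rfl⟩

-- ---- B computes the filtered level universe ----

theorem createSequence_alt_eq (n : Int) (hn : n ≤ 2147483648) :
    createSequence_alt n = (descAll 12 [2, 5]).filter (fun v => decide (v ≤ n)) := by
  obtain ⟨R, hR, -, hnR, halt⟩ := bDigits_spec n 64 0 (lt_of_le_of_lt hn (by norm_num))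
  have hR12 : R ≤ 12 := by
    rcases halt with rfl | h
    · omega
    · by_contra hc
      have h12 : (10 : Int) ^ 12 ≤ 10 ^ (R - 1) :=
        pow_le_pow_right₀ (by norm_num) (by omega)
      have := le_trans h12 h
      norm_num at this
      omega
  have hdig : bDigitsLoop n 64 1 0 = (R : Int) := by simpa using hR
  -- the inner mask loop of one length produces the filtered level list
  have hinner : ∀ (res : List Int) (length : Int),
      (PySem.List.pyRange 0 ((2 : Int) ^ length.toNat) 1).foldl
        (fun res mask =>
          let v := bNumLoop length.toNat 0 1 mask
          if v ≤ n then res ++ [v] else res) res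
      = res ++ (lvlI length.toNat).filter (fun v => decide (v ≤ n)) := by
    intro res length
    rw [show (2 : Int) ^ length.toNat = ((2 ^ length.toNat : Nat) : Int) from by
      push_cast; ring]
    rw [PySem.List.pyRange_one]
    rw [show (((2 ^ length.toNat : Nat) : Int) - 0).toNat = 2 ^ length.toNat from by
      rw [sub_zero]; exact Int.toNat_natCast _]
    rw [List.foldl_map]
    simp only [zero_add]
    have hb : ∀ (k : Nat), bNumLoop length.toNat 0 1 (k : Int) = num25 length.toNat k := by
      intro k; rw [bNumLoop_eq]; ring
    simp only [hb]
    rw [PySem.List.foldl_append_ite (p := fun k => num25 length.toNat k ≤ n)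
      (f := fun k => num25 length.toNat k)]
    unfold lvlI
    rw [List.filter_map]
    rfl
  simp only [createSequence_alt, hdig]
  have houter : (fun (res : List Int) (length : Int) =>
      (PySem.List.pyRange 0 ((2 : Int) ^ length.toNat) 1).foldl
        (fun res mask =>
          let v := bNumLoop length.toNat 0 1 mask
          if v ≤ n then res ++ [v] else res) res)
      = fun res length => res ++ (lvlI length.toNat).filter (fun v => decide (v ≤ n)) := by
    funext res length; exact hinner res length
  rw [houter, PySem.List.foldl_append_eq_flatMap]
  rw [PySem.List.pyRange_one]
  rw [show (((R : Int) + 1 - 1).toNat) = R from by omega]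
  rw [List.flatMap_map]
  rw [List.flatMap_congr (l := List.range R)
    (g := fun k => (lvlI (k + 1)).filter (fun v => decide (v ≤ n)))
    (fun k _ => by rw [show ((1 : Int) + (k : Int)).toNat = k + 1 from by omega])]
  rw [show (List.range R).flatMap (fun k => (lvlI (k + 1)).filter (fun v => decide (v ≤ n)))
      = ((List.range R).flatMap (fun k => lvlI (k + 1))).filter (fun v => decide (v ≤ n)) from by
    rw [List.filter_flatMap]]
  rw [flat_lvlI_eq_descAll]
  -- extend descAll R to descAll 12: the extra levels are all > n
  rw [show (12 : Nat) = R + (12 - R) from by omega, descAll_split, List.filter_append]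
  have htail : (descAll (12 - R) (expandIter R [2, 5])).filter (fun v => decide (v ≤ n)) = [] := by
    rw [List.filter_eq_nil_iff]
    intro w hw
    have hge : ∀ u ∈ expandIter R ([2, 5] : List Int), 2 * 10 ^ R ≤ u := by
      intro u hu
      exact expandIter_ge R [2, 5] u (by intro x hx; simp at hx; omega) hu
    have hnn : ∀ u ∈ expandIter R ([2, 5] : List Int), 0 ≤ u := by
      intro u hu
      have := hge u hu
      have hp : (0 : Int) < 10 ^ R := by positivity
      omega
    obtain ⟨u, hu, huw⟩ := descAll_exists_le (12 - R) _ w hnn hw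
    have h1 := hge u hu
    have hp : (0 : Int) < 10 ^ R := by positivity
    simp only [decide_eq_true_eq]
    omega
  rw [htail, List.append_nil]
  simp

-- ===== VERDICT (by name: the statement is the Claim_ definition above) =====
theorem createSequence_spec : Claim_equal_createSequence := by
  intro n hdom
  have hn : -2147483648 ≤ n ∧ n ≤ 2147483648 := by
    simpa [Dom_createSequence, pvDomInt] using hdom
  unfold Spec_createSequence createSequence
  -- A's queue of strings behaves like a queue of values
  have hA : aLoop n 100000 [['2'], ['5']] [] = vloop n 100000 [2, 5] [] := by
    have h := aLoop_eq_vloop n hn.2 100000 [(['2'], 2), (['5'], 5)] [] ?_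
    · simpa using h
    · intro p hp
      simp only [List.mem_cons, List.not_mem_nil, or_false] at hp
      rcases hp with rfl | rfl
      · exact ⟨0, by omega, by simp [lvlC], by decide⟩
      · exact ⟨0, by omega, by simp [lvlC], by decide⟩
  -- A's value queue emits a permutation of the filtered candidate forest
  have hpermA : (vloop n 100000 [2, 5] []).Perm
      (([2, 5].flatMap (desc 12)).filter (fun w => decide (w ≤ n))) := by
    have hsum : (([2, 5] : List Int).map (cost n 12)).sum ≤ 100000 := by
      have h2 := cost_le n 12 2
      have h5 := cost_le n 12 5
      simp only [List.map_cons, List.sum_cons, List.map_nil, List.sum_nil]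
      norm_num at h2 h5 ⊢
      omega
    have h := vloop_perm n (by omega) 100000 [2, 5] []
      (by intro v hv; simp at hv; omega) hsum
    have htd : ([2, 5] : List Int).flatMap (tree n 12)
        = ([2, 5].flatMap (desc 12)).filter (fun w => decide (w ≤ n)) := by
      simp only [List.flatMap_cons, List.flatMap_nil, List.append_nil, List.filter_append]
      rw [tree_eq_filter_desc n 12 2 (by omega), tree_eq_filter_desc n 12 5 (by omega)]
    rw [htd] at h
    simpa using h
  have hBinv : BInv 0 [2, 5] := by
    refine ⟨by simp, ?_, ?_⟩
    · exact List.pairwise_pair.mpr (by omega)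
    · intro v hv; simp at hv; rcases hv with rfl | rfl <;> norm_num
  -- the filtered candidate universe, strictly increasing
  have hpermB : ((descAll 12 [2, 5]).filter (fun v => decide (v ≤ n))).Perm
      (([2, 5].flatMap (desc 12)).filter (fun w => decide (w ≤ n))) :=
    (descAll_perm_flatMap_desc 12 [2, 5]).filter _
  have hpw : ((descAll 12 [2, 5]).filter (fun v => decide (v ≤ n))).Pairwise (· < ·) :=
    (descAll_pairwise 12 0 [2, 5] hBinv).filter _
  rw [hA]
  rw [PySem.List.sorted_eq_of_perm_of_pairwise_lt _ _ (fun x => x)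
    (hpermB.trans hpermA.symm) hpw]
  rw [createSequence_alt_eq n hn.2]
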